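-- pv_equiv track=rewrite | github.com/IvanKalug-QA/codewars | Calculate_String_Rotation.py | shifted_diff
-- ===== SOURCE A (Python) =====
-- def shifted_diff(first, second):
--     if first == second:
--         return 0
--     l = [i for i in second]
--     count = 0
--     res = ''
--     for i in range(len(second)):
--         l.append(l.pop(0))
--         count += 1
--         res = ''.join(l)
--         if res == first:
--             return count
--     return -1
-- ===== SOURCE B (Python) =====
-- def shifted_diff(first, second):
--     if len(first) != len(second):
--         return -1
--     return (second + second).find(first)
-- ===== Notes on version B (the rewrite author's own statement) =====
-- stated objective: faster
-- what changed: Replaced the rotate-one-step-and-compare loop (rebuilding and comparing a string each iteration) by a single substring search of first inside second+second, whose index is the shift count.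
import Mathlib
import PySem

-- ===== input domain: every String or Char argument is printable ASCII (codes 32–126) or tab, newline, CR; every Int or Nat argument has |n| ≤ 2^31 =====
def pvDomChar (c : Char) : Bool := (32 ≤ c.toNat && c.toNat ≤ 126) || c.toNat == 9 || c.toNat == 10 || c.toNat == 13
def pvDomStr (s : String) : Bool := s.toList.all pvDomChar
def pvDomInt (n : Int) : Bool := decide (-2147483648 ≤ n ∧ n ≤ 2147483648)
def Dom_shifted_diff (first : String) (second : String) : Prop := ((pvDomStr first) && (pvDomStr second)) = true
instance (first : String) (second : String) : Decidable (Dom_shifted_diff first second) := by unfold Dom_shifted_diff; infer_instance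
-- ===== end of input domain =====

-- B replaces A's rotate-one-step-and-compare loop by a single substring search of first in second+second.

-- ===== PORT A =====
-- the for-loop: state l (the rotating char list) and count; k = remaining iterations.
-- Python's res = ''.join(l); res == first is the char-list comparison l' = first.toList.
-- The [] branch is unreachable (the loop runs only when second is nonempty, and l keeps its length).
def pvLoopA (first : List Char) : List Char → Int → Nat → Int
  | _, _, 0 => -1
  | l, count, k+1 =>
    match l with
    | [] => -1
    | x :: rest =>
      let l' := rest ++ [x]       -- l.append(l.pop(0))
      let count' := count + 1
      if l' = first then count' else pvLoopA first l' count' k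

def shifted_diff (first : String) (second : String) : Int :=
  if first == second then 0
  else pvLoopA first.toList second.toList 0 second.toList.length

-- ===== PORT B =====
def shifted_diff_alt (first : String) (second : String) : Int :=
  if first.toList.length ≠ second.toList.length then -1
  else PySem.Chars.find (second.toList ++ second.toList) first.toList

-- ===== PRECONDITION & SPEC =====
def Spec_shifted_diff (first : String) (second : String) (out : Int) : Prop := out = shifted_diff_alt first second
instance (first : String) (second : String) (out : Int) : Decidable (Spec_shifted_diff first second out) := by unfold Spec_shifted_diff; infer_instance

-- ===== CLAIM (what is proved, stated in full; the proofs are below) =====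
def Claim_equal_shifted_diff : Prop := ∀ (first : String) (second : String), Dom_shifted_diff first second → Spec_shifted_diff first second (shifted_diff first second)

-- ===== LEMMAS AND PROOFS =====

-- rotation of s by j (A's list after j iterations)
def pvRot (s : List Char) (j : Nat) : List Char := s.drop j ++ s.take j

-- A's loop returns -1 when lengths can never match
theorem pvLoopA_ne_len (first : List Char) :
    ∀ k l (c : Int), l.length ≠ first.length → pvLoopA first l c k = -1 := by
  intro k
  induction k with
  | zero => intro l c _; rfl
  | succ k ih =>
    intro l c h
    cases l with
    | nil => rfl
    | cons x rest =>
      simp only [pvLoopA]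
      have hne : rest ++ [x] ≠ first := by
        intro he; apply h; rw [← he]; simp
      rw [if_neg hne]
      apply ih
      simpa using h

-- one rotation step of A's loop body
theorem pvRot_step (s : List Char) (c : Nat) (hc : c < s.length) :
    ∃ x rest, pvRot s c = x :: rest ∧ rest ++ [x] = pvRot s (c+1) := by
  have hd : s.drop c ≠ [] := by
    simp [List.drop_eq_nil_iff]; omega
  obtain ⟨x, t, ht⟩ := List.exists_cons_of_ne_nil hd
  refine ⟨x, t ++ s.take c, by simp [pvRot, ht], ?_⟩
  have hx : s[c]? = some x := by
    have h0 : (s.drop c)[0]? = some x := by rw [ht]; rfl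
    simpa using h0
  have htake : s.take (c+1) = s.take c ++ [x] := by
    rw [List.take_add_one, hx]; rfl
  have hdrop : s.drop (c+1) = t := by
    have := congrArg (List.drop 1) ht
    simpa [List.drop_drop, Nat.add_comm] using this
  simp [pvRot, htake, hdrop]

-- loop characterization: first j in (c, c+k] with pvRot s j = first, else -1
theorem pvLoopA_eq_find? (first s : List Char) :
    ∀ k c, c + k = s.length →
      pvLoopA first (pvRot s c) ((c : Nat) : Int) k =
        match (List.range' (c+1) k).find? (fun j => decide (pvRot s j = first)) with
        | some j => (j : Int)
        | none => -1 := by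
  intro k
  induction k with
  | zero => intro c _; simp [pvLoopA]
  | succ k ih =>
    intro c hck
    have hc : c < s.length := by omega
    obtain ⟨x, rest, hl, hstep⟩ := pvRot_step s c hc
    rw [hl]
    simp only [pvLoopA, hstep, List.range'_succ]
    by_cases h : pvRot s (c+1) = first
    · simp [h]
    · rw [if_neg h]
      have hcast : ((c : Int) + 1) = ((c + 1 : Nat) : Int) := by push_cast; ring
      rw [hcast, ih (c+1) (by omega)]
      simp [h]

-- an occurrence of first in s++s at index j ≤ |s| is exactly the rotation by j (when |first| = |s|)
theorem pvPrefix_iff_rot (first s : List Char) (hlen : first.length = s.length)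
    (j : Nat) (hj : j ≤ s.length) :
    first <+: (s ++ s).drop j ↔ first = pvRot s j := by
  rw [List.drop_append_of_le_length hj]
  constructor
  · intro hp
    have := List.prefix_iff_eq_take.mp hp
    rw [this, hlen, List.take_append]
    congr 1
    · exact List.take_of_length_le (by simp)
    · congr 1; simp; omega
  · intro he
    rw [he]
    exact (List.prefix_append_right_inj (s.drop j)).mpr (List.take_prefix j s)

-- prefix of a drop is an infix
theorem pvInfix_of_prefix_drop {f u : List Char} {j : Nat} (h : f <+: u.drop j) : f <:+: u := by
  obtain ⟨q, hq⟩ := h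
  exact ⟨u.take j, q, by rw [List.append_assoc, hq, List.take_append_drop]⟩

-- find? over range' returns the stated first hit
theorem pvFind?_range'_eq_some (p : Nat → Bool) :
    ∀ len start j, start ≤ j → j < start + len → p j = true →
      (∀ i, start ≤ i → i < j → p i = false) →
      (List.range' start len).find? p = some j := by
  intro len
  induction len with
  | zero => intro start j h1 h2; omega
  | succ len ih =>
    intro start j h1 h2 hp hmin
    rw [List.range'_succ, List.find?_cons]
    by_cases hsj : start = j
    · subst hsj; simp [hp]
    · have hs : p start = false := hmin start le_rfl (by omega)
      simp only [hs]
      exact ih (start+1) j (by omega) (by omega) hp (fun i hi1 hi2 => hmin i (by omega) hi2)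

-- the list-level equivalence
theorem pvMainList (f s : List Char) :
    (if f = s then (0 : Int) else pvLoopA f s 0 s.length) =
    (if f.length ≠ s.length then (-1 : Int) else PySem.Chars.find (s ++ s) f) := by
  by_cases hlen : f.length = s.length
  · rw [if_neg (not_not_intro hlen)]
    by_cases heq : f = s
    · -- A returns 0; find locates f at index 0
      rw [if_pos heq]
      have hpre : f <+: (s ++ s).drop 0 := by
        subst heq; simp only [List.drop_zero]; exact List.prefix_append f f
      have hnn : 0 ≤ PySem.Chars.find (s ++ s) f :=
        (PySem.Chars.find_nonneg_iff (s ++ s) f).mpr (pvInfix_of_prefix_drop hpre)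
      obtain ⟨h1, h2⟩ := PySem.Chars.find_spec hnn
      by_cases h0 : (PySem.Chars.find (s ++ s) f).toNat = 0
      · omega
      · exact absurd (by simpa using hpre) (h2 0 (by omega))
    · -- A runs its loop; both compute the first rotation index in [1, |s|]
      rw [if_neg heq]
      have hA : pvLoopA f s 0 s.length = pvLoopA f (pvRot s 0) ((0 : Nat) : Int) s.length := by
        simp [pvRot]
      rw [hA, pvLoopA_eq_find? f s s.length 0 (by omega)]
      by_cases hneg : PySem.Chars.find (s ++ s) f = -1
      · -- no occurrence at all → no rotation matches
        have hninf : ¬ f <:+: (s ++ s) := (PySem.Chars.find_eq_neg_one_iff (s ++ s) f).mp hneg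
        have hnone : (List.range' (0+1) s.length).find? (fun j => decide (pvRot s j = f)) = none := by
          rw [List.find?_eq_none]
          intro j hj
          simp only [decide_eq_true_eq]
          intro hrot
          have hjm := List.mem_range'_1.mp hj
          exact hninf (pvInfix_of_prefix_drop
            ((pvPrefix_iff_rot f s hlen j (by omega)).mpr hrot.symm))
        rw [hnone, hneg]
      · -- occurrence at index r ≥ 0: it is the first rotation index
        have hnn : 0 ≤ PySem.Chars.find (s ++ s) f := by
          have := PySem.Chars.neg_one_le_find (s ++ s) f
          omega
        obtain ⟨h1, h2⟩ := PySem.Chars.find_spec hnn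
        set j0 := (PySem.Chars.find (s ++ s) f).toNat with hj0
        have hspos : 0 < s.length := by
          rcases s with _ | _
          · exact absurd (List.length_eq_zero_iff.mp (by simpa using hlen)) heq
          · simp
        have hj0le : j0 ≤ s.length := by
          have hL := h1.length_le
          rw [List.length_drop, List.length_append] at hL
          omega
        have hrot : pvRot s j0 = f := ((pvPrefix_iff_rot f s hlen j0 hj0le).mp h1).symm
        have hj0pos : 1 ≤ j0 := by
          rcases Nat.eq_zero_or_pos j0 with h0 | h0
          · exfalso; apply heq; rw [← hrot, h0]; simp [pvRot]
          · omega
        have hsome : (List.range' (0+1) s.length).find? (fun j => decide (pvRot s j = f)) = some j0 := by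
          apply pvFind?_range'_eq_some
          · omega
          · omega
          · simp [hrot]
          · intro i hi1 hi2
            simp only [decide_eq_false_iff_not]
            intro hroti
            exact h2 i hi2 ((pvPrefix_iff_rot f s hlen i (by omega)).mpr hroti.symm)
        rw [hsome]
        show ((j0 : Nat) : Int) = PySem.Chars.find (s ++ s) f
        omega
  · -- length mismatch: A's loop never matches, B returns -1 immediately
    rw [if_pos hlen, if_neg (fun he => hlen (by rw [he]))]
    exact pvLoopA_ne_len f s.length s 0 (by omega)

-- ===== VERDICT (by name: the statement is the Claim_ definition above) =====
theorem shifted_diff_spec : Claim_equal_shifted_diff := by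
  intro first second _
  unfold Spec_shifted_diff shifted_diff shifted_diff_alt
  have hbeq : (first == second) = true ↔ first.toList = second.toList := by
    rw [beq_iff_eq, ← String.toList_inj]
  by_cases h : first.toList = second.toList
  · rw [if_pos (hbeq.mpr h)]
    have := pvMainList first.toList second.toList
    rwa [if_pos h] at this
  · rw [if_neg (fun hb => h (hbeq.mp hb))]
    have := pvMainList first.toList second.toList
    rwa [if_neg h] at this
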